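-- pv_equiv track=rewrite | github.com/rworktual-hash/WingX | backend/planner.py | _sort_nav_links
-- ===== SOURCE A (Python) =====
-- NAV_PREFERRED_ORDER = [
--     "Home", "Shop", "Products", "Categories", "Pricing", "Demo", "Request Demo",
--     "Get Started", "Login", "Sign In", "Account", "Cart", "Checkout", "Dashboard",
--     "Agent", "Admin Routing", "Support", "Settings",
-- ]
--
-- def _sort_nav_links(labels: list[str]) -> list[str]:
--     seen = set()
--     ordered = []
--     for preferred in NAV_PREFERRED_ORDER:
--         for label in labels:
--             if label == preferred and label not in seen:
--                 ordered.append(label)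
--                 seen.add(label)
--     for label in labels:
--         if label not in seen:
--             ordered.append(label)
--             seen.add(label)
--     return ordered
-- ===== SOURCE B (Python) =====
-- NAV_PREFERRED_ORDER = [
--     "Home", "Shop", "Products", "Categories", "Pricing", "Demo", "Request Demo",
--     "Get Started", "Login", "Sign In", "Account", "Cart", "Checkout", "Dashboard",
--     "Agent", "Admin Routing", "Support", "Settings",
-- ]
--
-- def _sort_nav_links(labels: list[str]) -> list[str]:
--     rank = {lbl: i for i, lbl in enumerate(NAV_PREFERRED_ORDER)}
--     cutoff = len(NAV_PREFERRED_ORDER)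
--     unique = list(dict.fromkeys(labels))
--     return sorted(unique, key=lambda l: rank.get(l, cutoff))
-- ===== Notes on version B (the rewrite author's own statement) =====
-- stated objective: faster
-- what changed: A builds the result by 18 per-preferred-label rescans of labels followed by a leftover pass with a shared seen set; B deduplicates labels once (dict.fromkeys) and does ONE stable sort keyed by a rank table (non-preferred labels get the sentinel rank 18, so stability keeps them in first-occurrence order), removing the repeated scans.
import Mathlib
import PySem

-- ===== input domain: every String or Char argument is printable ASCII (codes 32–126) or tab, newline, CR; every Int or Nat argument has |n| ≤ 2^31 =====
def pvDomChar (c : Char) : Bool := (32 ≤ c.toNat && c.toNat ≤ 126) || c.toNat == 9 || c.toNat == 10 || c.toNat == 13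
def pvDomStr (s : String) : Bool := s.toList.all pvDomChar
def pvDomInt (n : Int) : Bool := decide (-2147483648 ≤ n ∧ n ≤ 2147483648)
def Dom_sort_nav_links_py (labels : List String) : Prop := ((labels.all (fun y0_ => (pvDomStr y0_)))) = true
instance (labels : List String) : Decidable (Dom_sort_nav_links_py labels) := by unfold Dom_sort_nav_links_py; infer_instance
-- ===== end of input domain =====

-- B replaces A's 18 per-preferred-label rescans plus leftover pass by one ordered dedup and
-- ONE stable sort keyed by a rank table (sentinel rank for non-preferred labels); objective: faster (measured).

-- ===== PORT A =====
def navPreferredOrder : List String :=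
  ["Home", "Shop", "Products", "Categories", "Pricing", "Demo", "Request Demo",
   "Get Started", "Login", "Sign In", "Account", "Cart", "Checkout", "Dashboard",
   "Agent", "Admin Routing", "Support", "Settings"]

def sort_nav_links_py (labels : List String) : List String :=
  -- seen = set(); ordered = []
  let st0 : PySem.Set String × List String := (PySem.Set.empty, [])
  -- for preferred in NAV_PREFERRED_ORDER: for label in labels: …
  let st1 := navPreferredOrder.foldl (fun st preferred =>
      labels.foldl (fun st label =>
        if label == preferred && !(PySem.Set.contains st.1 label)
        then (PySem.Set.add st.1 label, st.2 ++ [label]) else st) st) st0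
  -- for label in labels: if label not in seen: …
  let st2 := labels.foldl (fun st label =>
      if !(PySem.Set.contains st.1 label)
      then (PySem.Set.add st.1 label, st.2 ++ [label]) else st) st1
  st2.2

-- ===== PORT B =====
-- rank = {lbl: i for i, lbl in enumerate(NAV_PREFERRED_ORDER)}
def navRank : PySem.Dict String Int :=
  (PySem.List.enumerate navPreferredOrder).foldl (fun d p => d.insert p.2 p.1) PySem.Dict.empty

def sort_nav_links_py_alt (labels : List String) : List String :=
  let cutoff : Int := (navPreferredOrder.length : Int)
  -- unique = list(dict.fromkeys(labels))
  let unique := PySem.List.dedup labels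
  -- sorted(unique, key=lambda l: rank.get(l, cutoff))  — stable sort
  PySem.List.sorted unique (fun l => PySem.Dict.getD navRank l cutoff) false

-- ===== PRECONDITION & SPEC =====
def Spec_sort_nav_links_py (labels : List String) (out : List String) : Prop := out = sort_nav_links_py_alt labels
instance (labels : List String) (out : List String) : Decidable (Spec_sort_nav_links_py labels out) := by unfold Spec_sort_nav_links_py; infer_instance

-- ===== CLAIM (what is proved, stated in full; the proofs are below) =====
def Claim_equal_sort_nav_links_py : Prop := ∀ (labels : List String), Dom_sort_nav_links_py labels → Spec_sort_nav_links_py labels (sort_nav_links_py labels)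

-- ===== LEMMAS AND PROOFS =====

-- the sort key B uses
def navKey (l : String) : Int := PySem.Dict.getD navRank l (navPreferredOrder.length : Int)

-- first-occurrence dedup of `ls` relative to an already-seen set `s` (proof-level description
-- of both A's second loop and PySem's ordered dedup)
def ddSeen (s : PySem.Set String) : List String → List String
  | [] => []
  | a :: t => if a ∈ s then ddSeen s t else a :: ddSeen (PySem.Set.add s a) t

lemma ddSeen_mem {x : String} : ∀ (ls : List String) (s : PySem.Set String),
    x ∈ ddSeen s ls → x ∈ ls ∧ x ∉ s := by
  intro ls
  induction ls with
  | nil => intro s h; simp [ddSeen] at h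
  | cons a t ih =>
    intro s h
    simp only [ddSeen] at h
    by_cases ha : a ∈ s
    · rcases ih s (by simpa [ha] using h) with ⟨h1, h2⟩
      exact ⟨List.mem_cons_of_mem _ h1, h2⟩
    · simp only [ha, ite_false] at h
      rcases List.mem_cons.mp h with rfl | h'
      · exact ⟨List.mem_cons_self, ha⟩
      · rcases ih _ h' with ⟨h1, h2⟩
        refine ⟨List.mem_cons_of_mem _ h1, fun hx => h2 ?_⟩
        rw [PySem.Set.mem_add]; exact Or.inl hx

lemma ddSeen_filter : ∀ (ls : List String) (s u : PySem.Set String),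
    (∀ x ∈ u, x ∈ s) →
    ddSeen s ls = (ddSeen u ls).filter (fun l => !decide (l ∈ s)) := by
  intro ls
  induction ls with
  | nil => intro s u _; rfl
  | cons a t ih =>
    intro s u hsub
    simp only [ddSeen]
    by_cases hau : a ∈ u
    · have has : a ∈ s := hsub a hau
      simp only [hau, has, ite_true]
      exact ih s u hsub
    · by_cases has : a ∈ s
      · simp only [hau, has, ite_true, ite_false, List.filter_cons, decide_true,
          Bool.not_true, Bool.false_eq_true]
        exact ih s (PySem.Set.add u a) (by
          intro x hx
          rcases (PySem.Set.mem_add u a x).mp hx with h | rfl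
          · exact hsub x h
          · exact has)
      · simp only [hau, has, ite_false, List.filter_cons, decide_false,
          Bool.not_false, if_true]
        have ihx := ih (PySem.Set.add s a) (PySem.Set.add u a) (by
          intro x hx
          rcases (PySem.Set.mem_add u a x).mp hx with h | heq
          · exact (PySem.Set.mem_add s a x).mpr (Or.inl (hsub x h))
          · exact (PySem.Set.mem_add s a x).mpr (Or.inr heq))
        rw [ihx]
        refine congrArg _ (List.filter_congr ?_)
        intro x hx
        have hxa : x ≠ a := by
          intro h; subst h
          exact (ddSeen_mem t (PySem.Set.add u x) hx).2 ((PySem.Set.mem_add u x x).mpr (Or.inr rfl))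
        simp [PySem.Set.mem_add, hxa]

lemma foldl_add_eq_ddSeen : ∀ (ls : List String) (s : PySem.Set String),
    ls.foldl PySem.Set.add s = s ++ ddSeen s ls := by
  intro ls
  induction ls with
  | nil => intro s; simp [ddSeen]
  | cons a t ih =>
    intro s
    simp only [List.foldl_cons, ddSeen]
    by_cases ha : a ∈ s
    · have : PySem.Set.add s a = s := by simp [PySem.Set.add, PySem.Set.contains, ha]
      rw [this, ih s, if_pos ha]
    · have hadd : PySem.Set.add s a = s ++ [a] := by simp [PySem.Set.add, PySem.Set.contains, ha]
      rw [hadd, ih (s ++ [a]), if_neg ha]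
      simp

lemma phase2_run : ∀ (ls : List String) (s : PySem.Set String) (o : List String),
    (ls.foldl (fun st label =>
        if !(PySem.Set.contains st.1 label)
        then (PySem.Set.add st.1 label, st.2 ++ [label]) else st) (s, o)).2
      = o ++ ddSeen s ls := by
  intro ls
  induction ls with
  | nil => intro s o; simp [ddSeen]
  | cons a t ih =>
    intro s o
    simp only [List.foldl_cons, ddSeen]
    by_cases ha : a ∈ s
    · have hc : (!(PySem.Set.contains (s : PySem.Set String) a)) = false := by
        simp [PySem.Set.contains, ha]
      simp only [hc, Bool.false_eq_true, if_false, ih, ha, ite_true]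
    · have hc : (!(PySem.Set.contains (s : PySem.Set String) a)) = true := by
        simp [PySem.Set.contains, ha]
      simp only [hc, if_true, ih, ha, ite_false]
      simp

lemma inner_skip (p : String) : ∀ (ls : List String) (s : PySem.Set String) (o : List String),
    p ∈ s →
    (ls.foldl (fun st label =>
        if label == p && !(PySem.Set.contains st.1 label)
        then (PySem.Set.add st.1 label, st.2 ++ [label]) else st) (s, o)) = (s, o) := by
  intro ls
  induction ls with
  | nil => intro s o _; rfl
  | cons a t ih =>
    intro s o hp
    have hc : (a == p && !(PySem.Set.contains (s : PySem.Set String) a)) = false := by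
      by_cases hap : a = p
      · subst hap; simp [PySem.Set.contains, hp]
      · simp [hap]
    simp only [List.foldl_cons, hc, Bool.false_eq_true, if_false]
    exact ih s o hp

lemma inner_run (p : String) : ∀ (ls : List String) (s : PySem.Set String) (o : List String),
    (ls.foldl (fun st label =>
        if label == p && !(PySem.Set.contains st.1 label)
        then (PySem.Set.add st.1 label, st.2 ++ [label]) else st) (s, o))
      = if p ∈ ls ∧ p ∉ s then (PySem.Set.add s p, o ++ [p]) else (s, o) := by
  intro ls
  induction ls with
  | nil => intro s o; simp
  | cons a t ih =>
    intro s o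
    by_cases hap : a = p
    · subst hap
      by_cases hs : a ∈ s
      · have hc : (a == a && !(PySem.Set.contains (s : PySem.Set String) a)) = false := by
          simp [PySem.Set.contains, hs]
        simp only [List.foldl_cons, hc, Bool.false_eq_true, if_false, ih]
        simp [hs]
      · have hc : (a == a && !(PySem.Set.contains (s : PySem.Set String) a)) = true := by
          simp [PySem.Set.contains, hs]
        simp only [List.foldl_cons, hc, if_true]
        rw [inner_skip a t (PySem.Set.add s a) (o ++ [a])
          ((PySem.Set.mem_add s a a).mpr (Or.inr rfl))]
        simp [hs]
    · have hc : (a == p && !(PySem.Set.contains (s : PySem.Set String) a)) = false := by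
        simp [hap]
      simp only [List.foldl_cons, hc, Bool.false_eq_true, if_false, ih]
      have : (p ∈ a :: t ∧ p ∉ s) ↔ (p ∈ t ∧ p ∉ s) := by
        constructor
        · rintro ⟨h1, h2⟩
          rcases List.mem_cons.mp h1 with h | h
          · exact absurd h.symm hap
          · exact ⟨h, h2⟩
        · rintro ⟨h1, h2⟩; exact ⟨List.mem_cons_of_mem _ h1, h2⟩
      rw [if_congr this rfl rfl]

lemma outer_run (labels : List String) : ∀ (nav : List String), nav.Nodup →
    ∀ (s : PySem.Set String) (o : List String), (∀ q ∈ nav, q ∉ s) →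
    ∃ s', (nav.foldl (fun st preferred =>
        labels.foldl (fun st label =>
          if label == preferred && !(PySem.Set.contains st.1 label)
          then (PySem.Set.add st.1 label, st.2 ++ [label]) else st) st) (s, o))
        = (s', o ++ nav.filter (fun q => decide (q ∈ labels)))
      ∧ ∀ x, x ∈ s' ↔ x ∈ s ∨ (x ∈ nav ∧ x ∈ labels) := by
  intro nav
  induction nav with
  | nil =>
    intro _ s o _
    exact ⟨s, by simp, fun x => by simp⟩
  | cons p t ih =>
    intro hnd s o hdisj
    have hps : p ∉ s := hdisj p List.mem_cons_self
    simp only [List.foldl_cons, inner_run p labels s o, List.filter_cons]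
    by_cases hpl : p ∈ labels
    · rw [if_pos ⟨hpl, hps⟩]
      obtain ⟨s', heq, hmem⟩ := ih (List.nodup_cons.mp hnd).2 (PySem.Set.add s p) (o ++ [p]) (by
        intro q hq hmem
        rcases (PySem.Set.mem_add s p q).mp hmem with h | rfl
        · exact hdisj q (List.mem_cons_of_mem _ hq) h
        · exact (List.nodup_cons.mp hnd).1 hq)
      refine ⟨s', ?_, ?_⟩
      · rw [heq]
        simp [hpl]
      · intro x
        rw [hmem x, PySem.Set.mem_add]
        constructor
        · rintro (⟨h | rfl⟩ | ⟨h1, h2⟩)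
          · exact Or.inl h
          · exact Or.inr ⟨List.mem_cons_self, hpl⟩
          · exact Or.inr ⟨List.mem_cons_of_mem _ h1, h2⟩
        · rintro (h | ⟨h1, h2⟩)
          · exact Or.inl (Or.inl h)
          · rcases List.mem_cons.mp h1 with rfl | h
            · exact Or.inl (Or.inr rfl)
            · exact Or.inr ⟨h, h2⟩
    · rw [if_neg (by rintro ⟨h, _⟩; exact hpl h)]
      obtain ⟨s', heq, hmem⟩ := ih (List.nodup_cons.mp hnd).2 s o
        (fun q hq => hdisj q (List.mem_cons_of_mem _ hq))
      refine ⟨s', ?_, ?_⟩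
      · rw [heq]; simp [hpl]
      · intro x
        rw [hmem x]
        constructor
        · rintro (h | ⟨h1, h2⟩)
          · exact Or.inl h
          · exact Or.inr ⟨List.mem_cons_of_mem _ h1, h2⟩
        · rintro (h | ⟨h1, h2⟩)
          · exact Or.inl h
          · rcases List.mem_cons.mp h1 with rfl | h
            · exact absurd h2 hpl
            · exact Or.inr ⟨h, h2⟩

lemma nav_nodup : navPreferredOrder.Nodup := by decide

-- ===== facts about B's key =====

-- key values of the preferred labels are their index; decided on the literal table
lemma navKey_pairwise : navPreferredOrder.Pairwise (fun a b => navKey a < navKey b) := by decide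

lemma navKey_lt_of_mem : ∀ x ∈ navPreferredOrder, navKey x < 18 := by decide

-- a label not in the table gets the sentinel
lemma rank_getD_notmem (dflt : Int) : ∀ (ns : List String) (s : Int) (d0 : PySem.Dict String Int)
    (x : String), x ∉ ns →
    PySem.Dict.getD ((PySem.List.enumerate ns s).foldl (fun d p => d.insert p.2 p.1) d0) x dflt
      = PySem.Dict.getD d0 x dflt := by
  intro ns
  induction ns with
  | nil => intro s d0 x _; rfl
  | cons a t ih =>
    intro s d0 x hx
    rw [PySem.List.enumerate_cons]
    simp only [List.foldl_cons]
    rw [ih (s + 1) (d0.insert a s) x (fun h => hx (List.mem_cons_of_mem _ h))]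
    have hxa : x ≠ a := fun h => hx (h ▸ List.mem_cons_self)
    simp [PySem.Dict.getD, PySem.Dict.get?_insert_of_ne d0 s hxa]

lemma navKey_of_notmem (x : String) (hx : x ∉ navPreferredOrder) : navKey x = 18 := by
  unfold navKey navRank
  rw [rank_getD_notmem _ navPreferredOrder 0 PySem.Dict.empty x hx]
  rfl

lemma navKey_le (x : String) : navKey x ≤ 18 := by
  by_cases hx : x ∈ navPreferredOrder
  · exact le_of_lt (navKey_lt_of_mem x hx)
  · exact le_of_eq (navKey_of_notmem x hx)

-- ===== stability of the sort: split off the sentinel-key block =====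

lemma insertBy_append_right {α : Type} (before : α → α → Bool) (x : α) :
    ∀ (A B : List α), (∀ y ∈ B, before x y = true) →
    PySem.List.insertBy before x (A ++ B) = PySem.List.insertBy before x A ++ B := by
  intro A
  induction A with
  | nil =>
    intro B hB
    cases B with
    | nil => rfl
    | cons b bs =>
      simp only [List.nil_append, PySem.List.insertBy, hB b List.mem_cons_self, if_true]
      rfl
  | cons a A' ih =>
    intro B hB
    simp only [List.cons_append, PySem.List.insertBy]
    by_cases h : before x a = true
    · simp [h]
    · simp only [h, if_false, Bool.false_eq_true]
      rw [ih B hB]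
      simp

lemma sorted_snoc (key : String → Int) (xs : List String) (x : String) :
    PySem.List.sorted (xs ++ [x]) key false
      = PySem.List.insertBy (fun a b => decide (key a < key b)) x
          (PySem.List.sorted xs key false) := by
  rw [PySem.List.sorted_eq_foldl_insertBy, PySem.List.sorted_eq_foldl_insertBy, List.foldl_append]
  simp only [List.foldl_cons, List.foldl_nil]

lemma sorted_split_sentinel (key : String → Int) (M : Int) :
    ∀ (xs : List String), (∀ x ∈ xs, key x ≤ M) →
    PySem.List.sorted xs key false
      = PySem.List.sorted (xs.filter (fun x => decide (key x < M))) key false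
        ++ xs.filter (fun x => decide (key x = M)) := by
  intro xs
  induction xs using List.reverseRecOn with
  | nil => intro _; rfl
  | append_singleton xs x ih =>
    intro hle
    have hxs : ∀ x ∈ xs, key x ≤ M := fun y hy => hle y (List.mem_append_left _ hy)
    have hxM : key x ≤ M := hle x (List.mem_append_right _ List.mem_cons_self)
    rw [PySem.List.sorted_eq_foldl_insertBy, List.foldl_append]
    simp only [List.foldl_cons, List.foldl_nil]
    rw [← PySem.List.sorted_eq_foldl_insertBy xs key]
    by_cases hM : key x = M
    · have hall : ∀ y ∈ PySem.List.sorted (xs.filter (fun x => decide (key x < M))) key false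
          ++ xs.filter (fun x => decide (key x = M)),
          (fun a b => decide (key a < key b)) x y = false := by
        intro y hy
        have hyx : y ∈ xs := by
          rcases List.mem_append.mp hy with h | h
          · exact List.mem_of_mem_filter ((PySem.List.mem_sorted _ _ _ _).mp h)
          · exact List.mem_of_mem_filter h
        simp only [decide_eq_false_iff_not, not_lt, hM]
        exact hxs y hyx
      rw [ih hxs, PySem.List.insertBy_of_forall_not_before _ _ _ hall]
      have h1 : (xs ++ [x]).filter (fun x => decide (key x < M))
          = xs.filter (fun x => decide (key x < M)) := by
        simp [List.filter_append, hM]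
      have h2 : (xs ++ [x]).filter (fun x => decide (key x = M))
          = xs.filter (fun x => decide (key x = M)) ++ [x] := by
        simp [List.filter_append, hM]
      rw [h1, h2, List.append_assoc]
    · have hlt : key x < M := lt_of_le_of_ne hxM hM
      have hB : ∀ y ∈ xs.filter (fun x => decide (key x = M)),
          (fun a b => decide (key a < key b)) x y = true := by
        intro y hy
        have : key y = M := by simpa using List.of_mem_filter hy
        simp [this, hlt]
      rw [ih hxs, insertBy_append_right _ _ _ _ hB]
      have h1 : (xs ++ [x]).filter (fun x => decide (key x < M))
          = xs.filter (fun x => decide (key x < M)) ++ [x] := by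
        simp [List.filter_append, hlt]
      have h2 : (xs ++ [x]).filter (fun x => decide (key x = M))
          = xs.filter (fun x => decide (key x = M)) := by
        simp [List.filter_append, hM]
      rw [h1, h2, sorted_snoc]

-- the strictly-ranked block of the sort is the preferred order filtered to present labels
lemma sorted_head (u : List String) (hu : u.Nodup) :
    PySem.List.sorted (u.filter (fun x => decide (navKey x < 18))) navKey false
      = navPreferredOrder.filter (fun p => decide (p ∈ u)) := by
  apply PySem.List.sorted_eq_of_perm_of_pairwise_lt
  · apply (List.perm_ext_iff_of_nodup (List.Nodup.filter _ nav_nodup) (List.Nodup.filter _ hu)).mpr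
    intro y
    simp only [List.mem_filter, decide_eq_true_eq]
    constructor
    · rintro ⟨h1, h2⟩; exact ⟨h2, navKey_lt_of_mem y h1⟩
    · rintro ⟨h1, h2⟩
      refine ⟨?_, h1⟩
      by_contra h
      rw [navKey_of_notmem y h] at h2
      omega
  · exact List.Pairwise.sublist List.filter_sublist navKey_pairwise

-- ===== VERDICT (by name: the statement is the Claim_ definition above) =====
theorem sort_nav_links_py_spec : Claim_equal_sort_nav_links_py := by
  intro labels _
  unfold Spec_sort_nav_links_py sort_nav_links_py sort_nav_links_py_alt
  dsimp only
  obtain ⟨s', heq, hmem⟩ := outer_run labels navPreferredOrder nav_nodup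
    PySem.Set.empty [] (by intro q _ h; simp [PySem.Set.empty] at h)
  rw [heq]
  rw [phase2_run labels s' (([] : List String) ++ navPreferredOrder.filter (fun q => decide (q ∈ labels)))]
  have hukey : PySem.List.sorted (PySem.List.dedup labels)
      (fun l => PySem.Dict.getD navRank l (navPreferredOrder.length : Int)) false
      = PySem.List.sorted (PySem.List.dedup labels) navKey false := rfl
  rw [hukey]
  rw [sorted_split_sentinel navKey 18 (PySem.List.dedup labels) (fun x _ => navKey_le x)]
  rw [sorted_head (PySem.List.dedup labels) (PySem.List.nodup_dedup labels)]
  have hdedup : PySem.List.dedup labels = ddSeen PySem.Set.empty labels := by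
    have h := foldl_add_eq_ddSeen labels PySem.Set.empty
    rw [PySem.List.dedup_eq_ofList, PySem.Set.ofList_eq_foldl]
    simpa [PySem.Set.empty] using h
  have hhead : navPreferredOrder.filter (fun q => decide (q ∈ labels))
      = navPreferredOrder.filter (fun p => decide (p ∈ PySem.List.dedup labels)) := by
    refine List.filter_congr ?_
    intro x _
    simp [PySem.List.dedup_eq_ofList, PySem.Set.mem_ofList]
  have htail : ddSeen s' labels
      = (PySem.List.dedup labels).filter (fun l => decide (navKey l = 18)) := by
    rw [hdedup]
    rw [ddSeen_filter labels s' PySem.Set.empty (by intro x h; simp [PySem.Set.empty] at h)]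
    refine List.filter_congr ?_
    intro x hx
    have hxl : x ∈ labels := (ddSeen_mem labels PySem.Set.empty hx).1
    have hs' : x ∈ s' ↔ x ∈ navPreferredOrder := by
      rw [hmem x]
      constructor
      · rintro (h | ⟨h1, _⟩)
        · simp [PySem.Set.empty] at h
        · exact h1
      · intro h; exact Or.inr ⟨h, hxl⟩
    by_cases hn : x ∈ navPreferredOrder
    · have := navKey_lt_of_mem x hn
      simp [hs', hn]
      omega
    · simp [hs', hn, navKey_of_notmem x hn]
  rw [hhead, htail]
  simp
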